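-- pv_equiv track=rewrite | github.com/yquilcaille/extend_attrib | fcts_support_event.py | clean_spaces
-- ===== SOURCE A (Python) =====
-- def clean_spaces( string ):
--     # 1. removing useless spaces
--     if len(string) > 0:
--         string = string.strip()
--
--     # 2. removing double spaces
--     new_string = ''
--     for i_x in range(len(string)):
--         if string[i_x] != ' ':
--             # simply add the character
--             new_string = new_string + string[i_x]
--
--         elif (string[i_x+1] == ' '):
--             # double space: skipping this space, and adding the next one
--             pass
--
--         else:
--             # simply add this space
--             new_string = new_string + string[i_x]
--
--     # prepare next step
--     string = new_string
--
--     # 3. putting spaces where some got forgotten: "X,Y" --> "X, Y"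
--     new_string = ''
--     for i_x in range(len(string)):
--         if string[i_x] != ',':
--             # simply add the character
--             new_string = new_string + string[i_x]
--         elif (i_x < len(string)-1) and (string[i_x+1] == ' '):
--             # character is ',', add it, next iteration will add correctly the space
--             new_string = new_string + ',' # string[i_x] == ','
--         elif (i_x < len(string)-1) and (string[i_x+1] != ' '):
--             # missing space! add ', ' before new character!
--             new_string = new_string + ', '
--
--     return new_string
-- ===== SOURCE B (Python) =====
-- def clean_spaces(string):
--     # One fused state-machine pass: a pending ' ' or ',' is emitted (or expanded
--     # to ', ') only when the next character is seen; a pending ',' at the end is dropped.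
--     s = string.strip()
--     out = []
--     pend = None  # None, ' ' or ','
--     for c in s:
--         if c == ' ':
--             if pend == ',':
--                 out.append(',')
--             pend = ' '
--         elif c == ',':
--             if pend == ' ':
--                 out.append(' ')
--             elif pend == ',':
--                 out.append(', ')
--             pend = ','
--         else:
--             if pend == ' ':
--                 out.append(' ')
--             elif pend == ',':
--                 out.append(', ')
--             pend = None
--             out.append(c)
--     return ''.join(out)
-- ===== Notes on version B (the rewrite author's own statement) =====
-- stated objective: faster
-- what changed: A's three separate index-driven passes (strip, then a scan collapsing double spaces, then a scan fixing commas, each rebuilding the string by repeated concatenation) are fused into a single state-machine pass that keeps one pending space-or-comma and appends to a list joined once.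
import Mathlib
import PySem

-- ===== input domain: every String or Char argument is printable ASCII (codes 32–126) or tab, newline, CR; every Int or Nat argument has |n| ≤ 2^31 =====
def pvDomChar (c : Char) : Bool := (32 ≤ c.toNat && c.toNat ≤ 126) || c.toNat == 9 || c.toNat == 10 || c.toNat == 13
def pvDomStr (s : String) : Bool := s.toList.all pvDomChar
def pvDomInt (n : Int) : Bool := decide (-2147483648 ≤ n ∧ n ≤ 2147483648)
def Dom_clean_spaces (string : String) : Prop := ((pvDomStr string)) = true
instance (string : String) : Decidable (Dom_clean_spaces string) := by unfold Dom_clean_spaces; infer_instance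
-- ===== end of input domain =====

-- B replaces A's three index-driven passes (strip, collapse double spaces, fix commas)
-- by a single fused state-machine pass over the characters; return values are proved equal.


-- ===== PORT A =====
-- loop body of A's step 2 ("removing double spaces"); `string[i_x+1]` could raise
-- IndexError in Python only when the last character is ' ', which is impossible after
-- strip(); ported via pyGet? (the `none` case falls into that unreachable else branch).
def pvBody2 (s : List Char) (acc : List Char) (i : Int) : List Char :=
  if PySem.List.pyGetD s i ' ' ≠ ' ' then acc ++ [PySem.List.pyGetD s i ' ']
  else if PySem.List.pyGet? s (i + 1) = some ' ' then acc
  else acc ++ [PySem.List.pyGetD s i ' ']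

-- loop body of A's step 3 (putting the space after a comma)
def pvBody3 (s : List Char) (acc : List Char) (i : Int) : List Char :=
  if PySem.List.pyGetD s i ' ' ≠ ',' then acc ++ [PySem.List.pyGetD s i ' ']
  else if i < PySem.Chars.len s - 1 ∧ PySem.List.pyGet? s (i + 1) = some ' ' then acc ++ [',']
  else if i < PySem.Chars.len s - 1 ∧ ¬ PySem.List.pyGet? s (i + 1) = some ' ' then acc ++ [',', ' ']
  else acc

def clean_spaces (string : String) : String :=
  let s0 := string.toList
  let s1 := if 0 < PySem.Chars.len s0 then PySem.Chars.strip s0 else s0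
  let s2 := (PySem.List.pyRange 0 (PySem.Chars.len s1) 1).foldl (pvBody2 s1) []
  let s3 := (PySem.List.pyRange 0 (PySem.Chars.len s2) 1).foldl (pvBody3 s2) []
  String.mk s3

-- ===== PORT B =====
-- the state-machine transition of Source B: state = (pending space/comma if any, output so far)
def pvStepB (st : Option Char × List Char) (c : Char) : Option Char × List Char :=
  if c = ' ' then
    (some ' ', if st.1 = some ',' then st.2 ++ [','] else st.2)
  else if c = ',' then
    (some ',', if st.1 = some ' ' then st.2 ++ [' ']
     else if st.1 = some ',' then st.2 ++ [',', ' '] else st.2)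
  else
    (none, (if st.1 = some ' ' then st.2 ++ [' ']
     else if st.1 = some ',' then st.2 ++ [',', ' '] else st.2) ++ [c])

def clean_spaces_alt (string : String) : String :=
  String.mk ((PySem.Chars.strip string.toList).foldl pvStepB (none, [])).2

-- ===== PRECONDITION & SPEC =====
def Spec_clean_spaces (string : String) (out : String) : Prop := out = clean_spaces_alt string
instance (string : String) (out : String) : Decidable (Spec_clean_spaces string out) := by unfold Spec_clean_spaces; infer_instance

-- ===== CLAIM (what is proved, stated in full; the proofs are below) =====
def Claim_equal_clean_spaces : Prop := ∀ (string : String), Dom_clean_spaces string → Spec_clean_spaces string (clean_spaces string)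

-- ===== LEMMAS AND PROOFS =====

-- per-character emissions of A's two passes, in lookahead form
def pvG2 (c : Char) (n : Option Char) : List Char :=
  if c ≠ ' ' then [c] else if n = some ' ' then [] else [c]

def pvG3 (c : Char) (n : Option Char) : List Char :=
  if c ≠ ',' then [c]
  else if n = some ' ' then [',']
  else if n = none then []
  else [',', ' ']

-- a lookahead pass as structural recursion
def pvLA (g : Char → Option Char → List Char) : List Char → List Char
  | [] => []
  | c :: r => g c r.head? ++ pvLA g r

@[simp] lemma pvLA_nil (g : Char → Option Char → List Char) : pvLA g [] = [] := rfl
@[simp] lemma pvLA_cons (g : Char → Option Char → List Char) (c : Char) (r : List Char) :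
    pvLA g (c :: r) = g c r.head? ++ pvLA g r := rfl

-- an index loop reading s[k] and s[k+1] is the lookahead pass
lemma pvFoldlLA_aux (g : Char → Option Char → List Char) :
    ∀ (l : List Char) (acc : List Char),
      (List.range l.length).foldl
        (fun a (k : Nat) => a ++ g (PySem.List.pyGetD l (k : Int) ' ') (PySem.List.pyGet? l ((k : Int) + 1))) acc
      = acc ++ pvLA g l := by
  intro l
  induction l with
  | nil => intro acc; simp
  | cons c r ih =>
    intro acc
    have e1 : ∀ k : Nat, PySem.List.pyGetD (c :: r) ((k + 1 : Nat) : Int) ' '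
        = PySem.List.pyGetD r (k : Int) ' ' := by
      intro k
      rw [PySem.List.pyGetD_natCast, PySem.List.pyGetD_natCast, List.getD_cons_succ]
    have e2 : ∀ k : Nat, PySem.List.pyGet? (c :: r) (((k + 1 : Nat) : Int) + 1)
        = PySem.List.pyGet? r ((k : Int) + 1) := by
      intro k
      rw [PySem.List.pyGet?_cons_succ c r (k + 1), PySem.List.pyGet?_natCast,
        show ((k : Int) + 1) = ((k + 1 : Nat) : Int) by push_cast; ring,
        PySem.List.pyGet?_natCast]
    have h0 : PySem.List.pyGetD (c :: r) ((0 : Nat) : Int) ' ' = c := by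
      rw [PySem.List.pyGetD_natCast]; rfl
    have h1 : PySem.List.pyGet? (c :: r) (((0 : Nat) : Int) + 1) = r.head? := by
      rw [PySem.List.pyGet?_cons_succ c r 0, PySem.List.pyGet?_natCast]
      exact List.head?_eq_getElem?.symm
    calc (List.range (c :: r).length).foldl
          (fun a (k : Nat) => a ++ g (PySem.List.pyGetD (c :: r) (k : Int) ' ')
            (PySem.List.pyGet? (c :: r) ((k : Int) + 1))) acc
        = (List.range r.length).foldl
          (fun a (k : Nat) => a ++ g (PySem.List.pyGetD r (k : Int) ' ')
            (PySem.List.pyGet? r ((k : Int) + 1)))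
          (acc ++ g c r.head?) := by
          rw [List.length_cons, List.range_succ_eq_map, List.foldl_cons, List.foldl_map]
          rw [show ((0 : Nat) : Int) = (0 : Int) from rfl] at h0 h1
          simp only [Nat.succ_eq_add_one, Nat.cast_zero] at *
          rw [h0, h1]
          apply PySem.List.foldl_congr_mem
          intro a k _
          rw [e1 k, e2 k]
      _ = acc ++ pvLA g (c :: r) := by rw [ih, pvLA_cons, List.append_assoc]

lemma pvFoldlLA (g : Char → Option Char → List Char) (l : List Char) :
    (PySem.List.pyRange 0 (PySem.Chars.len l) 1).foldl
      (fun a i => a ++ g (PySem.List.pyGetD l i ' ') (PySem.List.pyGet? l (i + 1))) []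
    = pvLA g l := by
  have hr : PySem.List.pyRange 0 (PySem.Chars.len l) 1
      = (List.range l.length).map (fun k : Nat => ((k : Int))) := by
    rw [show PySem.Chars.len l = ((l.length : Nat) : Int) from rfl, PySem.List.pyRange_one]
    simp
  rw [hr, List.foldl_map]
  exact pvFoldlLA_aux g l []

-- body rewrites
lemma pvBody2_eq (s : List Char) (acc : List Char) (i : Int) :
    pvBody2 s acc i = acc ++ pvG2 (PySem.List.pyGetD s i ' ') (PySem.List.pyGet? s (i + 1)) := by
  unfold pvBody2 pvG2
  split_ifs <;> simp_all

lemma pvBody3_eq (s : List Char) (acc : List Char) (i : Int)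
    (h0 : 0 ≤ i) (h1 : i < PySem.Chars.len s) :
    pvBody3 s acc i = acc ++ pvG3 (PySem.List.pyGetD s i ' ') (PySem.List.pyGet? s (i + 1)) := by
  have hlen : PySem.Chars.len s = ((s.length : Nat) : Int) := rfl
  unfold pvBody3 pvG3
  rw [hlen] at h1 ⊢
  rcases hn : PySem.List.pyGet? s (i + 1) with _ | d
  · have hnr : ¬ PySem.Raise.InRange s.length (i + 1) :=
      (PySem.List.pyGet?_eq_none_iff s (i + 1)).1 hn
    unfold PySem.Raise.InRange at hnr
    push_neg at hnr
    have hge : ((s.length : Nat) : Int) ≤ i + 1 := by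
      have hpos : (0 : Int) ≤ ((s.length : Nat) : Int) := Int.natCast_nonneg _
      exact hnr (by omega)
    have hni : ¬ i < ((s.length : Nat) : Int) - 1 := by omega
    split_ifs <;> simp_all
  · have hin : PySem.Raise.InRange s.length (i + 1) := by
      by_contra hcon
      rw [← PySem.List.pyGet?_eq_none_iff] at hcon
      rw [hn] at hcon
      simp at hcon
    have hlt : i < ((s.length : Nat) : Int) - 1 := by
      have := hin.2
      omega
    split_ifs <;> simp_all

lemma pvLoop2_eq (s : List Char) :
    (PySem.List.pyRange 0 (PySem.Chars.len s) 1).foldl (pvBody2 s) [] = pvLA pvG2 s := by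
  rw [← pvFoldlLA pvG2 s]
  exact PySem.List.foldl_congr_mem _ _ _ _ (fun acc i _ => pvBody2_eq s acc i)

lemma pvLoop3_eq (s : List Char) :
    (PySem.List.pyRange 0 (PySem.Chars.len s) 1).foldl (pvBody3 s) [] = pvLA pvG3 s := by
  rw [← pvFoldlLA pvG3 s]
  refine PySem.List.foldl_congr_mem _ _ _ _ (fun acc i hi => ?_)
  rw [PySem.List.mem_pyRange_one] at hi
  exact pvBody3_eq s acc i hi.1 hi.2

-- B's machine as a pure recursion on the remaining characters
def pvRelB : Option Char → List Char → List Char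
  | _, [] => []
  | pend, c :: r =>
    if c = ' ' then (if pend = some ',' then [','] else []) ++ pvRelB (some ' ') r
    else if c = ',' then
      (if pend = some ' ' then [' '] else if pend = some ',' then [',', ' '] else []) ++ pvRelB (some ',') r
    else
      (if pend = some ' ' then [' '] else if pend = some ',' then [',', ' '] else []) ++ ([c] ++ pvRelB none r)

lemma pvRelB_cons (pend : Option Char) (c : Char) (r : List Char) :
    pvRelB pend (c :: r) =
      if c = ' ' then (if pend = some ',' then [','] else []) ++ pvRelB (some ' ') r
      else if c = ',' then
        (if pend = some ' ' then [' '] else if pend = some ',' then [',', ' '] else []) ++ pvRelB (some ',') r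
      else
        (if pend = some ' ' then [' '] else if pend = some ',' then [',', ' '] else []) ++ ([c] ++ pvRelB none r) := rfl

lemma pvMachB : ∀ (l : List Char) (pend : Option Char) (out : List Char),
    (l.foldl pvStepB (pend, out)).2 = out ++ pvRelB pend l := by
  intro l
  induction l with
  | nil => intro pend out; simp [pvRelB]
  | cons c r ih =>
    intro pend out
    rw [List.foldl_cons, ← Prod.mk.eta (p := pvStepB (pend, out) c), ih, pvRelB_cons]
    unfold pvStepB
    split_ifs <;> simp_all

-- last-character facts
lemma pvLastTail {c : Char} {r : List Char} (h : (c :: r).getLast? ≠ some ' ') :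
    r.getLast? ≠ some ' ' := by
  cases r with
  | nil => simp
  | cons b t => rw [List.getLast?_cons_cons] at h; exact h

lemma pvStripNoTrail (s : List Char) : (PySem.Chars.strip s).getLast? ≠ some ' ' := by
  unfold PySem.Chars.strip PySem.Chars.rstrip
  rw [List.getLast?_reverse]
  cases h : (PySem.Chars.lstrip s).reverse.dropWhile PySem.Chars.isspace with
  | nil => simp
  | cons a u =>
    have hne : (PySem.Chars.lstrip s).reverse.dropWhile PySem.Chars.isspace ≠ [] := by simp [h]
    have hns := List.head_dropWhile_not PySem.Chars.isspace hne
    simp only [h, List.head_cons] at hns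
    simp only [List.head?_cons, ne_eq, Option.some_inj]
    intro hcontra
    subst hcontra
    simp [PySem.Chars.isspace] at hns

-- after a pending space the collapsed stream starts with a space
lemma pvHeadE2 : ∀ (r : List Char), (' ' :: r).getLast? ≠ some ' ' →
    (pvLA pvG2 (' ' :: r)).head? = some ' ' := by
  intro r
  induction r with
  | nil => intro h; simp at h
  | cons c t ih =>
    intro h
    by_cases hc : c = ' '
    · subst hc
      rw [List.getLast?_cons_cons] at h
      simpa [pvG2] using ih h
    · simp [pvG2, hc]

-- fusion: B's one-pass machine equals A's two lookahead passes on trailing-space-free input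
lemma pvFuse : ∀ (l : List Char),
    (l.getLast? ≠ some ' ' → pvRelB none l = pvLA pvG3 (pvLA pvG2 l))
    ∧ ((' ' :: l).getLast? ≠ some ' ' → pvRelB (some ' ') l = pvLA pvG3 (pvLA pvG2 (' ' :: l)))
    ∧ (l.getLast? ≠ some ' ' → pvRelB (some ',') l = pvLA pvG3 (',' :: pvLA pvG2 l)) := by
  intro l
  induction l with
  | nil =>
    refine ⟨fun _ => rfl, fun h => ?_, fun _ => ?_⟩
    · exact absurd (by simp : [' '].getLast? = some ' ') h
    · simp [pvRelB, pvG3]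
  | cons c r ih =>
    obtain ⟨ihA, ihB, ihC⟩ := ih
    refine ⟨fun h => ?_, fun h => ?_, fun h => ?_⟩
    · -- pending: none
      by_cases hc1 : c = ' '
      · subst hc1
        rw [show pvRelB none (' ' :: r) = pvRelB (some ' ') r by simp [pvRelB]]
        exact ihB h
      · by_cases hc2 : c = ','
        · subst hc2
          rw [show pvRelB none (',' :: r) = pvRelB (some ',') r by simp [pvRelB]]
          rw [ihC (pvLastTail h)]
          simp [pvG2]
        · rw [show pvRelB none (c :: r) = c :: pvRelB none r by simp [pvRelB, hc1, hc2]]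
          rw [ihA (pvLastTail h)]
          simp [pvG2, pvG3, hc1, hc2]
    · -- pending: ' '
      by_cases hc1 : c = ' '
      · subst hc1
        rw [List.getLast?_cons_cons] at h
        rw [show pvRelB (some ' ') (' ' :: r) = pvRelB (some ' ') r by simp [pvRelB]]
        rw [ihB h]
        simp [pvG2]
      · by_cases hc2 : c = ','
        · subst hc2
          rw [show pvRelB (some ' ') (',' :: r) = ' ' :: pvRelB (some ',') r by simp [pvRelB]]
          rw [ihC (pvLastTail (pvLastTail h))]
          simp [pvG2, pvG3]
        · rw [show pvRelB (some ' ') (c :: r) = ' ' :: c :: pvRelB none r by simp [pvRelB, hc1, hc2]]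
          rw [ihA (pvLastTail (pvLastTail h))]
          simp [pvG2, pvG3, hc1, hc2]
    · -- pending: ','
      by_cases hc1 : c = ' '
      · subst hc1
        rw [show pvRelB (some ',') (' ' :: r) = ',' :: pvRelB (some ' ') r by simp [pvRelB]]
        rw [ihB h]
        rw [show pvLA pvG3 (',' :: pvLA pvG2 (' ' :: r))
            = pvG3 ',' (pvLA pvG2 (' ' :: r)).head? ++ pvLA pvG3 (pvLA pvG2 (' ' :: r)) from rfl]
        rw [pvHeadE2 r h]
        simp [pvG3]
      · by_cases hc2 : c = ','
        · subst hc2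
          rw [show pvRelB (some ',') (',' :: r) = ',' :: ' ' :: pvRelB (some ',') r by simp [pvRelB]]
          rw [ihC (pvLastTail h)]
          simp [pvG2, pvG3]
        · rw [show pvRelB (some ',') (c :: r) = ',' :: ' ' :: c :: pvRelB none r by
              simp [pvRelB, hc1, hc2]]
          rw [ihA (pvLastTail h)]
          simp [pvG2, pvG3, hc1, hc2]

-- A's conditional strip is an unconditional strip
lemma pvStripIf (s0 : List Char) :
    (if 0 < PySem.Chars.len s0 then PySem.Chars.strip s0 else s0) = PySem.Chars.strip s0 := by
  cases s0 with
  | nil => simp [PySem.Chars.len, PySem.Chars.strip, PySem.Chars.lstrip, PySem.Chars.rstrip]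
  | cons c r =>
    rw [if_pos]
    unfold PySem.Chars.len
    exact_mod_cast Nat.succ_pos r.length

-- ===== VERDICT (by name: the statement is the Claim_ definition above) =====
theorem clean_spaces_spec : Claim_equal_clean_spaces := by
  intro s _
  unfold Spec_clean_spaces
  show clean_spaces s = clean_spaces_alt s
  unfold clean_spaces clean_spaces_alt
  simp only [pvStripIf, pvLoop2_eq, pvLoop3_eq, pvMachB]
  rw [(pvFuse (PySem.Chars.strip s.toList)).1 (pvStripNoTrail s.toList)]
  simp
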